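-- pv_equiv track=rewrite | github.com/ThomasGl/TAU-EE-Notes | Year 1 Semester ב/DLS/Algorithms/Algorithms.py | topOrd
-- ===== SOURCE A (Python) =====
-- def deg(sign, v, E):
--     return (
--         len([e for e in E if e[1] == v])
--         if sign == 1  # in
--         else len([e for e in E if e[0] == v])
--         if sign == -1  # out
--         else 0
--     )
--
-- def sink(V, E):
--     return [v for v in V if deg(-1, v, E) == 0][0]
--
-- def minus_graph(V, E, U_):
--     return (
--         [v for v in V if v not in U_],
--         [(u, v) for u, v in E if u not in U_ and v not in U_],
--     )
--
-- def topOrd(V, E):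
--     if len(V) == 1:
--         return [0]
--     else:
--         s = sink(V, E)
--         i = V.index(s)
--         pi = topOrd(*minus_graph(V, E, [s]))
--         return pi[:i] + [len(V) - 1] + pi[i:]
-- ===== SOURCE B (Python) =====
-- def topOrd(V, E):
--     n = len(V)
--     out = {v: 0 for v in V}
--     preds = {v: [] for v in V}
--     for u, w in E:
--         if u in out:              # edges from vertices outside V never affect out-degrees
--             out[u] += 1
--             if w in preds:        # an edge leaving V can never be cleared, so it keeps blocking u
--                 preds[w].append(u)
--     removed = set()
--     rank = {}
--     for r in range(n - 1, 0, -1):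
--         s = None
--         for v in V:
--             if v not in removed and out[v] == 0:
--                 s = v
--                 break
--         if s is None:
--             raise ValueError("no sink among remaining vertices")
--         removed.add(s)
--         rank[s] = r
--         for u in preds[s]:
--             out[u] -= 1
--     for v in V:                    # the single remaining vertex is trivially ordered: rank 0
--         if v not in removed:
--             rank[v] = 0
--     return [rank[v] for v in V]
-- ===== Notes on version B (the rewrite author's own statement) =====
-- stated objective: faster
-- what changed: Replaces A's recursion that rebuilds the graph and recomputes every vertex's out-degree from scratch at each sink removal with a single iterative pass over precomputed out-degree and predecessor tables that are decremented in place as vertices are removed.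
-- outside the precondition, e.g. on topOrd([1, 1, 2], []): A returns [2, 0], B returns [2, 2, 1]
import Mathlib
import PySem

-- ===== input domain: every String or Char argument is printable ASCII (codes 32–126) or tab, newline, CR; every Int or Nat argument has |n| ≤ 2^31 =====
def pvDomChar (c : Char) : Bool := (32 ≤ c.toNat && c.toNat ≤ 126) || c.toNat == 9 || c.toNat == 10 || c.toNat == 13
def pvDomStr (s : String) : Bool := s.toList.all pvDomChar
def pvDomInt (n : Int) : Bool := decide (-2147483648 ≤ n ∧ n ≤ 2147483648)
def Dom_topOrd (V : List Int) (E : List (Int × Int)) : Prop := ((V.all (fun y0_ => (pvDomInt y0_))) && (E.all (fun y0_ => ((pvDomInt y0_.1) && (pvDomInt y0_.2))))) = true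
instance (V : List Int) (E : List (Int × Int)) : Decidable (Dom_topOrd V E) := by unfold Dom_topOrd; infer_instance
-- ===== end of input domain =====

-- B replaces A's recursive remove-first-sink-and-recompute-all-degrees scheme by one iterative
-- pass over precomputed out-degree/predecessor tables that are decremented in place (asymptotically cheaper).

-- ===== PORT A =====
-- deg(sign, v, E)
def pyDeg (sign : Int) (v : Int) (E : List (Int × Int)) : Int :=
  if sign = 1 then ((E.filter (fun e => decide (e.2 = v))).length : Int)
  else if sign = -1 then ((E.filter (fun e => decide (e.1 = v))).length : Int)
  else 0

-- sink(V, E); none = the `[0]` IndexError (no vertex of out-degree 0)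
def pySink? (V : List Int) (E : List (Int × Int)) : Option Int :=
  (V.filter (fun v => decide (pyDeg (-1) v E = 0))).head?

def topOrd (V : List Int) (E : List (Int × Int)) : List Int :=
  if V.length = 1 then [0]
  else
    match hs : pySink? V E with
    | none => []        -- Python raises IndexError here (excluded by Pre_)
    | some s =>
      match PySem.List.index? V s with
      | none => []      -- unreachable: s ∈ V
      | some i =>
        -- minus_graph(V, E, [s]) inlined: v not in [s]  /  u not in [s] and v not in [s]
        let pr := topOrd (V.filter (fun v => decide ¬(v = s)))
                         (E.filter (fun e => decide ¬(e.1 = s) && decide ¬(e.2 = s)))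
        -- pi[:i] + [len(V) - 1] + pi[i:] ; i : ℕ, and Python slices clamp exactly like take/drop
        pr.take i ++ [(V.length : Int) - 1] ++ pr.drop i
termination_by V.length
decreasing_by
  have hsV : s ∈ V :=
    List.mem_of_find?_eq_some (p := fun v => decide (pyDeg (-1) v E = 0))
      (by rw [← List.head?_filter]; exact hs)
  simp only [List.length_unattach]
  have h2 : (V.attach.filter (fun x => decide ¬(x.1 = s))).length < V.attach.length :=
    List.length_filter_lt_length_iff_exists.mpr ⟨⟨s, hsV⟩, List.mem_attach _ _, by simp⟩
  simpa using h2

-- ===== PORT B =====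
-- out = {v: 0 for v in V} ; preds = {v: [] for v in V}
def altOut0 (V : List Int) : PySem.Dict Int Int :=
  V.foldl (fun d v => d.insert v 0) PySem.Dict.empty
def altPreds0 (V : List Int) : PySem.Dict Int (List Int) :=
  V.foldl (fun d v => d.insert v []) PySem.Dict.empty

-- the `for u, w in E` degree-building loop
def altBuild (E : List (Int × Int)) (st : PySem.Dict Int Int × PySem.Dict Int (List Int)) :
    PySem.Dict Int Int × PySem.Dict Int (List Int) :=
  E.foldl
    (fun st e =>
      if st.1.contains e.1 then
        (st.1.modify e.1 0 (· + 1),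
         if st.2.contains e.2 then st.2.modify e.2 [] (· ++ [e.1]) else st.2)
      else st)
    st

-- the inner `for v in V: … break` scan
def altScan (V : List Int) (removed : PySem.Set Int) (out : PySem.Dict Int Int) : Option Int :=
  V.find? (fun v => !(PySem.Set.contains removed v) && (out.getD v 0 == 0))

-- `for r in range(n-1, 0, -1)` with fuel = r; none = the ValueError
def altLoop (V : List Int) (preds : PySem.Dict Int (List Int)) :
    Nat → PySem.Set Int → PySem.Dict Int Int → PySem.Dict Int Int →
    Option (PySem.Set Int × PySem.Dict Int Int)
  | 0, removed, _, rank => some (removed, rank)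
  | k + 1, removed, out, rank =>
    match altScan V removed out with
    | none => none
    | some s =>
      altLoop V preds k (PySem.Set.add removed s)
        ((preds.getD s []).foldl (fun d u => d.modify u 0 (· - 1)) out)
        (rank.insert s ((k : Int) + 1))

def topOrd_alt (V : List Int) (E : List (Int × Int)) : List Int :=
  let st := altBuild E (altOut0 V, altPreds0 V)
  match altLoop V st.2 (V.length - 1) PySem.Set.empty st.1 PySem.Dict.empty with
  | none => []        -- Python raises ValueError here (excluded by Pre_)
  | some (removed, rank) =>
    let rank := V.foldl (fun rk v => if PySem.Set.contains removed v then rk else rk.insert v 0) rank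
    -- [rank[v] for v in V]; inside Pre_ every v ∈ V has a rank, so getD is exact
    V.map (fun v => rank.getD v 0)

-- ===== PRECONDITION & SPEC =====
-- Pre_ excludes vertex lists with duplicate entries (a vertex set is malformed there and A's
-- all-copies-at-once removal returns a list of accidental length), and otherwise admits exactly
-- the inputs on which A returns: V nonempty and every ≥2-element subset of V containing a vertex
-- all of whose out-edges lead into V but out of the subset (so repeated first-sink removal
-- reaches a single vertex).
def Pre_topOrd (V : List Int) (E : List (Int × Int)) : Prop :=
  V ≠ [] ∧ V.Nodup ∧
    ∀ S ∈ V.sublists, 2 ≤ S.length →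
      ∃ v ∈ S, ∀ e ∈ E, e.1 = v → e.2 ∈ V ∧ e.2 ∉ S
instance (V : List Int) (E : List (Int × Int)) : Decidable (Pre_topOrd V E) := by
  unfold Pre_topOrd; infer_instance

def pvWitness_topOrd : List Int × (List (Int × Int)) := ([1, 2, 3], [(1, 2), (2, 3)])

def Spec_topOrd (V : List Int) (E : List (Int × Int)) (out : List Int) : Prop := out = topOrd_alt V E
instance (V : List Int) (E : List (Int × Int)) (out : List Int) : Decidable (Spec_topOrd V E out) := by
  unfold Spec_topOrd; infer_instance

-- ===== CLAIM (what is proved, stated in full; the proofs are below) =====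
def Claim_equal_topOrd : Prop := ∀ (V : List Int) (E : List (Int × Int)),
  Dom_topOrd V E → Pre_topOrd V E → Spec_topOrd V E (topOrd V E)

-- ===== LEMMAS AND PROOFS =====

-- general find? congruence over members
theorem pvFind?_congr {α : Type} (l : List α) (p q : α → Bool)
    (h : ∀ x ∈ l, p x = q x) : l.find? p = l.find? q := by
  induction l with
  | nil => rfl
  | cons a l ih =>
    simp only [List.find?_cons]
    rw [h a (List.mem_cons_self)]
    cases q a
    · exact ih fun x hx => h x (List.mem_cons_of_mem _ hx)
    · rfl

-- countP splits along a second test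
theorem pvCountP_split {α : Type} (l : List α) (p q : α → Bool) :
    l.countP p = l.countP (fun a => p a && q a) + l.countP (fun a => p a && !q a) := by
  induction l with
  | nil => rfl
  | cons a l ih =>
    simp only [List.countP_cons]
    cases hp : p a <;> cases hq : q a <;> simp [hp, hq] <;> omega

-- ===== B-side loop characterisations =====

theorem altBuild_out_getD (E : List (Int × Int)) :
    ∀ (o : PySem.Dict Int Int) (p : PySem.Dict Int (List Int)) (x : Int),
      (altBuild E (o, p)).1.getD x 0
        = o.getD x 0 + (E.countP (fun e => o.contains e.1 && decide (e.1 = x)) : Int) := by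
  induction E with
  | nil => intro o p x; simp [altBuild]
  | cons e E ih =>
    intro o p x
    by_cases h1 : o.contains e.1
    · have hco : ∀ y : Int, (o.modify e.1 0 (· + 1)).contains y = o.contains y := by
        intro y; rw [PySem.Dict.contains_modify]
        by_cases hy : y = e.1 <;> simp_all
      have hgd : (o.modify e.1 0 (· + 1)).getD x 0
          = o.getD x 0 + (if e.1 = x then 1 else 0) := by
        rw [PySem.Dict.getD_modify]
        by_cases hx : x = e.1 <;> simp [hx, eq_comm] <;> ring
      have hcnt : (E.countP (fun e' => (o.modify e.1 0 (· + 1)).contains e'.1 && decide (e'.1 = x)))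
          = E.countP (fun e' => o.contains e'.1 && decide (e'.1 = x)) :=
        List.countP_congr (fun a _ => by rw [hco a.1])
      by_cases h2 : p.contains e.2 <;>
      · simp only [altBuild, List.foldl_cons, h1, h2, if_true, Bool.false_eq_true, reduceIte,
          List.countP_cons]
        refine ((ih _ _ x).trans ?_)
        rw [hcnt, hgd]
        by_cases hx : e.1 = x <;> simp [hx, h1] <;> push_cast <;> ring
    · simp only [altBuild, List.foldl_cons, h1, Bool.false_eq_true, reduceIte, List.countP_cons]
      refine (ih _ _ x).trans ?_
      simp [h1]

theorem altBuild_preds_getD (E : List (Int × Int)) :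
    ∀ (o : PySem.Dict Int Int) (p : PySem.Dict Int (List Int)) (t : Int),
      (altBuild E (o, p)).2.getD t []
        = p.getD t [] ++ (E.filter
            (fun e => o.contains e.1 && p.contains e.2 && decide (e.2 = t))).map (fun e => e.1) := by
  induction E with
  | nil => intro o p t; simp [altBuild]
  | cons e E ih =>
    intro o p t
    by_cases h1 : o.contains e.1
    · by_cases h2 : p.contains e.2
      · have hcp : ∀ y : Int, (p.modify e.2 [] (· ++ [e.1])).contains y = p.contains y := by
          intro y; rw [PySem.Dict.contains_modify]
          by_cases hy : y = e.2 <;> simp_all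
        have hco : ∀ y : Int, (o.modify e.1 0 (· + 1)).contains y = o.contains y := by
          intro y; rw [PySem.Dict.contains_modify]
          by_cases hy : y = e.1 <;> simp_all
        have hflt : (E.filter (fun e' => (o.modify e.1 0 (· + 1)).contains e'.1
              && (p.modify e.2 [] (· ++ [e.1])).contains e'.2 && decide (e'.2 = t)))
            = E.filter (fun e' => o.contains e'.1 && p.contains e'.2 && decide (e'.2 = t)) :=
          List.filter_congr (fun a _ => by rw [hco a.1, hcp a.2])
        have hgd : (p.modify e.2 [] (· ++ [e.1])).getD t []
            = p.getD t [] ++ (if e.2 = t then [e.1] else []) := by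
          rw [PySem.Dict.getD_modify]
          by_cases ht : t = e.2 <;> simp [ht, eq_comm]
        simp only [altBuild, List.foldl_cons, h1, h2, if_true, List.filter_cons]
        refine (ih _ _ t).trans ?_
        rw [hflt, hgd]
        by_cases ht : e.2 = t <;> simp [ht, h1, h2]
      · simp only [altBuild, List.foldl_cons, h1, h2, if_true, Bool.false_eq_true, reduceIte,
          List.filter_cons]
        have hco : ∀ y : Int, (o.modify e.1 0 (· + 1)).contains y = o.contains y := by
          intro y; rw [PySem.Dict.contains_modify]
          by_cases hy : y = e.1 <;> simp_all
        refine (ih _ _ t).trans ?_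
        rw [List.filter_congr (fun (a : Int × Int) _ => by rw [hco a.1] :
          ∀ a ∈ E, ((o.modify e.1 0 (· + 1)).contains a.1 && p.contains a.2 && decide (a.2 = t))
            = (o.contains a.1 && p.contains a.2 && decide (a.2 = t)))]
        simp [h2]
    · simp only [altBuild, List.foldl_cons, h1, Bool.false_eq_true, reduceIte, List.filter_cons]
      refine (ih _ _ t).trans ?_
      simp [h1]

theorem foldl_insert_const_getD {ν : Type} (V : List Int) :
    ∀ (d : PySem.Dict Int ν) (c : ν), (∀ k : Int, d.getD k c = c) →
      ∀ x : Int, (V.foldl (fun d v => d.insert v c) d).getD x c = c := by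
  induction V with
  | nil => intro d c hd x; exact hd x
  | cons v V ih =>
    intro d c hd x
    simp only [List.foldl_cons]
    refine ih _ c (fun k => ?_) x
    rw [PySem.Dict.getD_insert]
    by_cases hk : k = v <;> simp [hk, hd k]

theorem foldl_insert_const_contains {ν : Type} (V : List Int) :
    ∀ (d : PySem.Dict Int ν) (x : Int) (c : ν),
      (V.foldl (fun d v => d.insert v c) d).contains x = (decide (x ∈ V) || d.contains x) := by
  induction V with
  | nil => intro d x c; simp
  | cons v V ih =>
    intro d x c
    simp only [List.foldl_cons]
    rw [ih, PySem.Dict.contains_insert]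
    by_cases hx : x = v <;> by_cases hm : x ∈ V <;> simp [hx, hm]

theorem decr_getD (us : List Int) :
    ∀ (d : PySem.Dict Int Int) (x : Int),
      (us.foldl (fun d u => d.modify u 0 (· - 1)) d).getD x 0
        = d.getD x 0 - (us.count x : Int) := by
  induction us with
  | nil => intro d x; simp
  | cons u us ih =>
    intro d x
    simp only [List.foldl_cons, List.count_cons]
    rw [ih, PySem.Dict.getD_modify]
    by_cases hx : x = u
    · subst hx
      rw [if_pos rfl]
      simp only [BEq.rfl, if_true]
      push_cast; ring
    · rw [if_neg hx]
      have h2 : (u == x) = false := beq_eq_false_iff_ne.mpr (fun h => hx h.symm)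
      simp only [h2, Bool.false_eq_true, if_false, Nat.add_zero]

theorem fill_getD (l : List Int) (c : Int → Bool) :
    ∀ (rk : PySem.Dict Int Int) (x : Int),
      (l.foldl (fun rk v => if c v then rk else rk.insert v 0) rk).getD x 0
        = if x ∈ l ∧ c x = false then 0 else rk.getD x 0 := by
  induction l with
  | nil => intro rk x; simp
  | cons v l ih =>
    intro rk x
    simp only [List.foldl_cons]
    by_cases hv : c v
    · rw [if_pos hv, ih]
      by_cases hx : x = v
      · subst hx; simp [hv]
      · simp [hx]
    · rw [if_neg hv, ih, PySem.Dict.getD_insert]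
      by_cases hx : x = v
      · subst hx; simp [hv]
      · simp [hx]

-- contains after Set.add
theorem set_contains_add (r : PySem.Set Int) (t x : Int) :
    (PySem.Set.add r t).contains x = (decide (x = t) || r.contains x) := by
  by_cases ht : r.contains t
  · simp only [PySem.Set.add, ht, if_true]
    by_cases hx : x = t
    · subst hx; simp only [decide_true, Bool.true_or]; exact ht
    · simp [hx]
  · simp only [PySem.Set.add, ht, Bool.false_eq_true, reduceIte]
    simp only [PySem.Set.contains, List.contains_append]
    by_cases hx : x = t <;> simp [hx, PySem.Set.contains]

-- one loop step on both sides selects the same vertex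
theorem altScan_eq (s : Int) (P Q : List Int) (hsP : s ∉ P) (hsQ : s ∉ Q)
    (rB rS : PySem.Set Int) (oB oS : PySem.Dict Int Int)
    (hr : ∀ x, rB.contains x = (decide (x = s) || rS.contains x))
    (ho : ∀ x, x ≠ s → oB.getD x 0 = oS.getD x 0) :
    altScan (P ++ s :: Q) rB oB = altScan (P ++ Q) rS oS := by
  have hpt : ∀ x, x ≠ s →
      (!(PySem.Set.contains rB x) && (oB.getD x 0 == 0))
        = (!(PySem.Set.contains rS x) && (oS.getD x 0 == 0)) := by
    intro x hx
    rw [ho x hx, hr x]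
    simp [hx]
  simp only [altScan, List.find?_append, List.find?_cons]
  rw [show (!(PySem.Set.contains rB s) && (oB.getD s 0 == 0)) = false by
    rw [hr s]; simp]
  rw [pvFind?_congr P _ _ (fun x hxP => hpt x (fun h => hsP (h ▸ hxP))),
      pvFind?_congr Q _ _ (fun x hxQ => hpt x (fun h => hsQ (h ▸ hxQ)))]

-- the big loop (s already removed, ranked c) and the small loop stay in lockstep
theorem altLoop_bisim (s : Int) (P Q : List Int) (hsP : s ∉ P) (hsQ : s ∉ Q)
    (pB pS : PySem.Dict Int (List Int))
    (hp : ∀ t, t ≠ s → pB.getD t [] = pS.getD t []) (c : Int) :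
    ∀ (k : Nat) (rB rS : PySem.Set Int) (oB oS rkB rkS : PySem.Dict Int Int),
      (∀ x, rB.contains x = (decide (x = s) || rS.contains x)) →
      (∀ x, x ≠ s → oB.getD x 0 = oS.getD x 0) →
      (∀ x, x ≠ s → rkB.getD x 0 = rkS.getD x 0) →
      rkB.getD s 0 = c →
      (match altLoop (P ++ s :: Q) pB k rB oB rkB, altLoop (P ++ Q) pS k rS oS rkS with
       | some (remB, rkB'), some (remS, rkS') =>
           (∀ x, remB.contains x = (decide (x = s) || remS.contains x)) ∧
           (∀ x, x ≠ s → rkB'.getD x 0 = rkS'.getD x 0) ∧ rkB'.getD s 0 = c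
       | none, none => True
       | _, _ => False) := by
  intro k
  induction k with
  | zero =>
    intro rB rS oB oS rkB rkS hr ho hrk hrs
    exact ⟨hr, hrk, hrs⟩
  | succ k ih =>
    intro rB rS oB oS rkB rkS hr ho hrk hrs
    rw [show altLoop (P ++ s :: Q) pB (k + 1) rB oB rkB
        = match altScan (P ++ s :: Q) rB oB with
          | none => none
          | some t => altLoop (P ++ s :: Q) pB k (PySem.Set.add rB t)
              ((pB.getD t []).foldl (fun d u => d.modify u 0 (· - 1)) oB)
              (rkB.insert t ((k : Int) + 1)) from rfl]
    rw [show altLoop (P ++ Q) pS (k + 1) rS oS rkS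
        = match altScan (P ++ Q) rS oS with
          | none => none
          | some t => altLoop (P ++ Q) pS k (PySem.Set.add rS t)
              ((pS.getD t []).foldl (fun d u => d.modify u 0 (· - 1)) oS)
              (rkS.insert t ((k : Int) + 1)) from rfl]
    rw [← altScan_eq s P Q hsP hsQ rB rS oB oS hr ho]
    cases hscan : altScan (P ++ s :: Q) rB oB with
    | none => exact trivial
    | some t =>
      have htmem : t ∈ P ++ s :: Q := List.mem_of_find?_eq_some hscan
      have htB : rB.contains t = false ∧ (oB.getD t 0 == 0) = true := by
        have := List.find?_some hscan
        simpa using this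
      have hts : t ≠ s := by
        intro h
        subst h
        rw [hr t] at htB
        simp at htB
      refine ih (PySem.Set.add rB t) (PySem.Set.add rS t) _ _ _ _ ?_ ?_ ?_ ?_
      · intro x
        rw [set_contains_add, set_contains_add, hr x]
        by_cases hx : x = t <;> by_cases hxs : x = s <;> simp [hx, hxs]
      · intro x hx
        rw [decr_getD, decr_getD, ho x hx, hp t hts]
      · intro x hx
        rw [PySem.Dict.getD_insert, PySem.Dict.getD_insert]
        by_cases hxt : x = t <;> simp [hxt, hrk x hx]
      · rw [PySem.Dict.getD_insert, if_neg (fun h => hts h.symm), hrs]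

-- A's sink, when found, is the first vertex of V with no outgoing edge in E
theorem sink_find (V : List Int) (E : List (Int × Int)) :
    pySink? V E = V.find? (fun v => decide (pyDeg (-1) v E = 0)) := by
  simp [pySink?, List.head?_filter]

theorem sink_no_out {V : List Int} {E : List (Int × Int)} {s : Int}
    (hs : pySink? V E = some s) : ∀ e ∈ E, e.1 ≠ s := by
  rw [sink_find] at hs
  have hp := List.find?_some hs
  have hdeg : pyDeg (-1) s E = 0 := by simpa using hp
  have : (E.filter (fun e => decide (e.1 = s))).length = 0 := by
    simpa [pyDeg] using hdeg
  intro e he h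
  have hmem : e ∈ E.filter (fun e => decide (e.1 = s)) := List.mem_filter.mpr ⟨he, by simp [h]⟩
  rw [List.length_eq_zero_iff] at this
  rw [this] at hmem
  exact absurd hmem (List.not_mem_nil)

theorem sink_mem {V : List Int} {E : List (Int × Int)} {s : Int}
    (hs : pySink? V E = some s) : s ∈ V := by
  rw [sink_find] at hs
  exact List.mem_of_find?_eq_some hs

theorem sink_exists {V : List Int} {E : List (Int × Int)}
    (hpre : Pre_topOrd V E) (h2 : 2 ≤ V.length) : ∃ s, pySink? V E = some s := by
  obtain ⟨-, -, hsub⟩ := hpre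
  obtain ⟨v, hvV, hv⟩ := hsub V (List.mem_sublists.mpr (List.Sublist.refl V)) h2
  have hno : ∀ e ∈ E, ¬(decide (e.1 = v) = true) := by
    intro e he
    simp only [decide_eq_true_eq]
    intro h
    exact (hv e he h).2 (hv e he h).1
  have hp : decide (pyDeg (-1) v E = 0) = true := by
    have : E.filter (fun e => decide (e.1 = v)) = [] := List.filter_eq_nil_iff.mpr hno
    simp [pyDeg, this]
  rw [sink_find]
  have : (V.find? (fun v => decide (pyDeg (-1) v E = 0))).isSome :=
    List.find?_isSome.mpr ⟨v, hvV, hp⟩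
  exact Option.isSome_iff_exists.mp this

-- Pre_ descends to the reduced graph
theorem pre_minus {V : List Int} {E : List (Int × Int)} (s : Int)
    (hpre : Pre_topOrd V E) (hV' : V.filter (fun v => decide ¬(v = s)) ≠ []) :
    Pre_topOrd (V.filter (fun v => decide ¬(v = s)))
      (E.filter (fun e => decide ¬(e.1 = s) && decide ¬(e.2 = s))) := by
  obtain ⟨hne, hnd, hsub⟩ := hpre
  refine ⟨hV', hnd.filter _, ?_⟩
  intro S hS h2S
  have hSV : S ∈ V.sublists := by
    rw [List.mem_sublists] at hS ⊢
    exact hS.trans List.filter_sublist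
  obtain ⟨v, hvS, hv⟩ := hsub S hSV h2S
  refine ⟨v, hvS, ?_⟩
  intro e he h1
  have heE : e ∈ E := List.mem_of_mem_filter he
  have hf := List.of_mem_filter he
  have h2 := hv e heE h1
  refine ⟨List.mem_filter.mpr ⟨h2.1, ?_⟩, h2.2⟩
  simp only [Bool.and_eq_true, decide_eq_true_eq] at hf
  simp [hf.2]

-- A's result is never empty on Pre_
theorem topOrd_ne_nil {V : List Int} {E : List (Int × Int)}
    (hpre : Pre_topOrd V E) : topOrd V E ≠ [] := by
  by_cases h1 : V.length = 1
  · rw [topOrd]; simp [h1]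
  · have h0 : V ≠ [] := hpre.1
    have h2 : 2 ≤ V.length := by
      have := List.length_pos_of_ne_nil h0; omega
    obtain ⟨s, hs⟩ := sink_exists hpre h2
    have hsV := sink_mem hs
    have hidx : (PySem.List.index? V s).isSome := by
      rw [PySem.List.index?_isSome_iff]
      exact hsV
    obtain ⟨i, hi⟩ := Option.isSome_iff_exists.mp hidx
    rw [topOrd, if_neg h1]
    split
    · next h => rw [hs] at h; cases h
    · next s' hseq =>
      split
      · next hidx' =>
        rw [hs] at hseq
        cases Option.some.inj hseq
        rw [hi] at hidx'
        cases hidx'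
      · next i' hidx' => simp

theorem beq_int (a b : Int) : (a == b) = decide (a = b) := by
  by_cases h : a = b <;> simp [h]

theorem topOrd_single (v : Int) (E : List (Int × Int)) : topOrd [v] E = [0] := by
  rw [topOrd]; simp

theorem topOrd_alt_single (v : Int) (E : List (Int × Int)) : topOrd_alt [v] E = [0] := by
  simp only [topOrd_alt]
  rw [show ([v] : List Int).length - 1 = 0 from rfl]
  rw [show altLoop [v] (altBuild E (altOut0 [v], altPreds0 [v])).2 0 PySem.Set.empty
      (altBuild E (altOut0 [v], altPreds0 [v])).1 PySem.Dict.empty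
      = some (PySem.Set.empty, PySem.Dict.empty) from rfl]
  show [((if PySem.Set.contains PySem.Set.empty v then PySem.Dict.empty
      else PySem.Dict.empty.insert v 0).getD v 0)] = [0]
  rw [if_neg (by simp [PySem.Set.contains, PySem.Set.empty])]
  rw [PySem.Dict.getD_insert_self]

theorem topOrd_eq {V : List Int} {E : List (Int × Int)} {s : Int} {i : Nat}
    (h1 : ¬ V.length = 1) (hs : pySink? V E = some s) (hi : PySem.List.index? V s = some i) :
    topOrd V E
      = (topOrd (V.filter (fun v => decide ¬(v = s)))
          (E.filter (fun e => decide ¬(e.1 = s) && decide ¬(e.2 = s)))).take i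
        ++ ((V.length : Int) - 1)
        :: (topOrd (V.filter (fun v => decide ¬(v = s)))
          (E.filter (fun e => decide ¬(e.1 = s) && decide ¬(e.2 = s)))).drop i := by
  rw [topOrd, if_neg h1]
  split
  · next h => rw [hs] at h; cases h
  · next s' hseq =>
    rw [hs] at hseq
    cases Option.some.inj hseq
    split
    · next hidx' => rw [hi] at hidx'; cases hidx'
    · next i' hidx' =>
      rw [hi] at hidx'
      cases Option.some.inj hidx'
      show List.take i _ ++ [_] ++ List.drop i _ = _
      simp

theorem topOrd_main : ∀ (n : Nat) (V : List Int) (E : List (Int × Int)),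
    V.length = n → Pre_topOrd V E → topOrd V E = topOrd_alt V E := by
  intro n
  induction n using Nat.strong_induction_on with
  | _ n IH =>
  intro V E hlen hpre
  by_cases h1 : V.length = 1
  · obtain ⟨v, hv⟩ := List.length_eq_one_iff.mp h1
    subst hv
    rw [topOrd_single, topOrd_alt_single]
  · have h0 : V ≠ [] := hpre.1
    have hnd : V.Nodup := hpre.2.1
    have h2 : 2 ≤ V.length := by have := List.length_pos_of_ne_nil h0; omega
    obtain ⟨s, hs⟩ := sink_exists hpre h2
    have hsV := sink_mem hs
    have hnoout := sink_no_out hs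
    obtain ⟨i, hi⟩ := Option.isSome_iff_exists.mp ((PySem.List.index?_isSome_iff V s).mpr hsV)
    obtain ⟨P, Q, hV, hPlen, hsP⟩ := (PySem.List.index?_eq_some_iff V s i).mp hi
    have hsQ : s ∉ Q := by
      have hnd2 : (s :: Q).Nodup := (hV ▸ hnd).of_append_right
      exact (List.nodup_cons.mp hnd2).1
    have hPne : ∀ x ∈ P, x ≠ s := fun x hx h => hsP (h ▸ hx)
    have hQne : ∀ x ∈ Q, x ≠ s := fun x hx h => hsQ (h ▸ hx)
    have hV' : V.filter (fun v => decide ¬(v = s)) = P ++ Q := by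
      rw [hV, List.filter_append, List.filter_cons]
      rw [List.filter_eq_self.mpr (fun x hx => by simp [hPne x hx]),
          List.filter_eq_self.mpr (fun x hx => by simp [hQne x hx])]
      simp
    have hV'len : (V.filter (fun v => decide ¬(v = s))).length = V.length - 1 := by
      rw [hV', hV]; simp
    have hV'ne : V.filter (fun v => decide ¬(v = s)) ≠ [] := by
      have : 1 ≤ (V.filter (fun v => decide ¬(v = s))).length := by omega
      exact List.ne_nil_of_length_pos (by omega)
    have hpre' := pre_minus s hpre hV'ne
    have hIH : topOrd (V.filter (fun v => decide ¬(v = s)))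
        (E.filter (fun e => decide ¬(e.1 = s) && decide ¬(e.2 = s)))
        = topOrd_alt (V.filter (fun v => decide ¬(v = s)))
            (E.filter (fun e => decide ¬(e.1 = s) && decide ¬(e.2 = s))) :=
      IH (V.length - 1) (by omega) _ _ hV'len hpre'
    -- ===== B side =====
    -- initial dictionaries
    have hc0 : ∀ x : Int, (altOut0 V).contains x = decide (x ∈ V) := by
      intro x
      rw [altOut0, foldl_insert_const_contains]
      simp
    have hcP0 : ∀ x : Int, (altPreds0 V).contains x = decide (x ∈ V) := by
      intro x
      rw [altPreds0, foldl_insert_const_contains]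
      simp
    have ho0 : ∀ x : Int, (altOut0 V).getD x 0 = 0 :=
      foldl_insert_const_getD V PySem.Dict.empty 0 (fun k => by simp)
    have hp0 : ∀ x : Int, (altPreds0 V).getD x [] = [] :=
      foldl_insert_const_getD V PySem.Dict.empty [] (fun k => by simp)
    have hc0' : ∀ x : Int, (altOut0 (P ++ Q)).contains x = decide (x ∈ P ++ Q) := by
      intro x
      rw [altOut0, foldl_insert_const_contains]
      simp
    have hcP0' : ∀ x : Int, (altPreds0 (P ++ Q)).contains x = decide (x ∈ P ++ Q) := by
      intro x
      rw [altPreds0, foldl_insert_const_contains]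
      simp
    have ho0' : ∀ x : Int, (altOut0 (P ++ Q)).getD x 0 = 0 :=
      foldl_insert_const_getD (P ++ Q) PySem.Dict.empty 0 (fun k => by simp)
    have hp0' : ∀ x : Int, (altPreds0 (P ++ Q)).getD x [] = [] :=
      foldl_insert_const_getD (P ++ Q) PySem.Dict.empty [] (fun k => by simp)
    -- built dictionaries
    have hoB0 : ∀ x : Int, (altBuild E (altOut0 V, altPreds0 V)).1.getD x 0
        = (E.countP (fun e => decide (e.1 ∈ V) && decide (e.1 = x)) : Int) := by
      intro x
      rw [altBuild_out_getD, ho0 x,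
        List.countP_congr (fun e _ => by rw [hc0 e.1])]
      ring
    have hpB : ∀ t : Int, (altBuild E (altOut0 V, altPreds0 V)).2.getD t []
        = (E.filter (fun e => decide (e.1 ∈ V) && decide (e.2 ∈ V) && decide (e.2 = t))).map
            (fun e => e.1) := by
      intro t
      rw [altBuild_preds_getD, hp0 t,
        List.filter_congr (fun e _ => by rw [hc0 e.1, hcP0 e.2])]
      simp
    have hoS0 : ∀ x : Int,
        (altBuild (E.filter (fun e => decide ¬(e.1 = s) && decide ¬(e.2 = s)))
          (altOut0 (P ++ Q), altPreds0 (P ++ Q))).1.getD x 0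
        = ((E.filter (fun e => decide ¬(e.1 = s) && decide ¬(e.2 = s))).countP
            (fun e => decide (e.1 ∈ P ++ Q) && decide (e.1 = x)) : Int) := by
      intro x
      rw [altBuild_out_getD, ho0' x,
        List.countP_congr (fun e _ => by rw [hc0' e.1])]
      ring
    have hpS : ∀ t : Int,
        (altBuild (E.filter (fun e => decide ¬(e.1 = s) && decide ¬(e.2 = s)))
          (altOut0 (P ++ Q), altPreds0 (P ++ Q))).2.getD t []
        = ((E.filter (fun e => decide ¬(e.1 = s) && decide ¬(e.2 = s))).filter
            (fun e => decide (e.1 ∈ P ++ Q) && decide (e.2 ∈ P ++ Q) && decide (e.2 = t))).map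
            (fun e => e.1) := by
      intro t
      rw [altBuild_preds_getD, hp0' t,
        List.filter_congr (fun e _ => by rw [hc0' e.1, hcP0' e.2])]
      simp
    -- vertex membership in the reduced list
    have hmem' : ∀ x : Int, x ∈ P ++ Q ↔ (x ∈ V ∧ x ≠ s) := by
      intro x
      rw [← hV']
      simp
    -- preds agree off s
    have hp_eq : ∀ t, t ≠ s →
        (altBuild E (altOut0 V, altPreds0 V)).2.getD t []
          = (altBuild (E.filter (fun e => decide ¬(e.1 = s) && decide ¬(e.2 = s)))
              (altOut0 (P ++ Q), altPreds0 (P ++ Q))).2.getD t [] := by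
      intro t hts
      rw [hpB t, hpS t, List.filter_filter]
      refine congrArg _ (List.filter_congr ?_).symm
      intro e he
      have h1s : e.1 ≠ s := hnoout e he
      by_cases het : e.2 = t
      · have h2s : e.2 ≠ s := het ▸ hts
        have hm1 : (e.1 ∈ P ++ Q) ↔ e.1 ∈ V := by rw [hmem' e.1]; exact ⟨And.left, fun h => ⟨h, h1s⟩⟩
        have hm2 : (e.2 ∈ P ++ Q) ↔ e.2 ∈ V := by rw [hmem' e.2]; exact ⟨And.left, fun h => ⟨h, h2s⟩⟩
        have d1 : decide (e.1 ∈ P ++ Q) = decide (e.1 ∈ V) := by simp [hm1]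
        have d2 : decide (e.2 ∈ P ++ Q) = decide (e.2 ∈ V) := by simp [hm2]
        rw [d1, d2]
        simp [het, h1s, h2s, hts]
      · simp [het]
    -- out-degree tables agree off s after the first decrement
    have ho_init : ∀ x, x ≠ s →
        (((altBuild E (altOut0 V, altPreds0 V)).2.getD s []).foldl
            (fun d u => d.modify u 0 (· - 1)) (altBuild E (altOut0 V, altPreds0 V)).1).getD x 0
          = (altBuild (E.filter (fun e => decide ¬(e.1 = s) && decide ¬(e.2 = s)))
              (altOut0 (P ++ Q), altPreds0 (P ++ Q))).1.getD x 0 := by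
      intro x hxs
      rw [decr_getD, hoB0 x, hoS0 x, hpB s, List.count_eq_countP, List.countP_map,
        List.countP_filter, List.countP_filter]
      rw [pvCountP_split E (fun e => decide (e.1 ∈ V) && decide (e.1 = x))
        (fun e => decide (e.2 = s))]
      have hB : E.countP (fun e => ((· == x) ∘ fun e => e.1) e
            && (decide (e.1 ∈ V) && decide (e.2 ∈ V) && decide (e.2 = s)))
          = E.countP (fun e => (decide (e.1 ∈ V) && decide (e.1 = x)) && decide (e.2 = s)) := by
        refine List.countP_congr ?_
        intro e he
        by_cases hx : e.1 = x <;> by_cases h2s : e.2 = s <;>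
          simp [hx, h2s, hsV, beq_int]
      have hC : E.countP (fun e => (decide (e.1 ∈ P ++ Q) && decide (e.1 = x))
            && (decide ¬(e.1 = s) && decide ¬(e.2 = s)))
          = E.countP (fun e => (decide (e.1 ∈ V) && decide (e.1 = x)) && !decide (e.2 = s)) := by
        refine List.countP_congr ?_
        intro e he
        have h1s : e.1 ≠ s := hnoout e he
        have d1 : decide (e.1 ∈ P ++ Q) = decide (e.1 ∈ V ∧ e.1 ≠ s) := by simp [hmem' e.1]
        rw [d1]
        by_cases hx : e.1 = x <;> by_cases h2s : e.2 = s <;> by_cases h1V : e.1 ∈ V <;>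
          simp [hx, h2s, h1s, h1V, hxs]
      rw [hB, hC]
      push_cast
      ring
    -- the first scan finds exactly A's sink
    have hscan1 : altScan V PySem.Set.empty (altBuild E (altOut0 V, altPreds0 V)).1 = some s := by
      rw [altScan, ← hs, sink_find]
      refine pvFind?_congr V _ _ ?_
      intro v hvV
      have hcnt : E.countP (fun e => decide (e.1 ∈ V) && decide (e.1 = v))
          = E.countP (fun e => decide (e.1 = v)) := by
        refine List.countP_congr ?_
        intro e he
        by_cases hx : e.1 = v <;> simp [hx, hvV]
      rw [hoB0 v, hcnt]
      have hdeg : pyDeg (-1) v E = ((E.countP (fun e => decide (e.1 = v))) : Int) := by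
        rw [pyDeg]
        norm_num [← List.countP_eq_length_filter]
      rw [hdeg]
      rw [beq_int]
      simp [PySem.Set.contains, PySem.Set.empty]
    -- one step of the big loop removes s and ranks it |V| - 1
    have hfuel : V.length - 1 = (V.length - 2) + 1 := by omega
    have hstep : altLoop V (altBuild E (altOut0 V, altPreds0 V)).2 (V.length - 1)
        PySem.Set.empty (altBuild E (altOut0 V, altPreds0 V)).1 PySem.Dict.empty
        = altLoop V (altBuild E (altOut0 V, altPreds0 V)).2 (V.length - 2)
            (PySem.Set.add PySem.Set.empty s)
            (((altBuild E (altOut0 V, altPreds0 V)).2.getD s []).foldl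
              (fun d u => d.modify u 0 (· - 1)) (altBuild E (altOut0 V, altPreds0 V)).1)
            (PySem.Dict.empty.insert s (((V.length - 2 : Nat) : Int) + 1)) := by
      rw [hfuel]
      rw [show altLoop V (altBuild E (altOut0 V, altPreds0 V)).2 ((V.length - 2) + 1)
          PySem.Set.empty (altBuild E (altOut0 V, altPreds0 V)).1 PySem.Dict.empty
          = (match altScan V PySem.Set.empty (altBuild E (altOut0 V, altPreds0 V)).1 with
             | none => none
             | some t => altLoop V (altBuild E (altOut0 V, altPreds0 V)).2 (V.length - 2)
                 (PySem.Set.add PySem.Set.empty t)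
                 (((altBuild E (altOut0 V, altPreds0 V)).2.getD t []).foldl
                   (fun d u => d.modify u 0 (· - 1)) (altBuild E (altOut0 V, altPreds0 V)).1)
                 (PySem.Dict.empty.insert t (((V.length - 2 : Nat) : Int) + 1))) from rfl]
      rw [hscan1]
    -- bisimulation of the two loops
    have hbis := altLoop_bisim s P Q hsP hsQ
      (altBuild E (altOut0 V, altPreds0 V)).2
      (altBuild (E.filter (fun e => decide ¬(e.1 = s) && decide ¬(e.2 = s)))
        (altOut0 (P ++ Q), altPreds0 (P ++ Q))).2
      hp_eq (((V.length - 2 : Nat) : Int) + 1) (V.length - 2)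
      (PySem.Set.add PySem.Set.empty s) PySem.Set.empty
      (((altBuild E (altOut0 V, altPreds0 V)).2.getD s []).foldl
        (fun d u => d.modify u 0 (· - 1)) (altBuild E (altOut0 V, altPreds0 V)).1)
      (altBuild (E.filter (fun e => decide ¬(e.1 = s) && decide ¬(e.2 = s)))
        (altOut0 (P ++ Q), altPreds0 (P ++ Q))).1
      (PySem.Dict.empty.insert s (((V.length - 2 : Nat) : Int) + 1)) PySem.Dict.empty
      (fun x => set_contains_add PySem.Set.empty s x)
      ho_init
      (fun x hx => by rw [PySem.Dict.getD_insert, if_neg hx])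
      (by rw [PySem.Dict.getD_insert, if_pos rfl])
    rw [← hV] at hbis
    have hlen2 : (P ++ Q).length - 1 = V.length - 2 := by
      rw [← hV']; omega
    -- the small loop cannot fail (its failure would make the recursive result [])
    cases hLS : altLoop (P ++ Q)
        (altBuild (E.filter (fun e => decide ¬(e.1 = s) && decide ¬(e.2 = s)))
          (altOut0 (P ++ Q), altPreds0 (P ++ Q))).2 (V.length - 2) PySem.Set.empty
        (altBuild (E.filter (fun e => decide ¬(e.1 = s) && decide ¬(e.2 = s)))
          (altOut0 (P ++ Q), altPreds0 (P ++ Q))).1 PySem.Dict.empty with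
    | none =>
      exfalso
      have halt : topOrd_alt (V.filter (fun v => decide ¬(v = s)))
          (E.filter (fun e => decide ¬(e.1 = s) && decide ¬(e.2 = s))) = [] := by
        simp only [topOrd_alt]
        rw [hV', hlen2, hLS]
      exact topOrd_ne_nil hpre' (hIH.trans halt)
    | some res =>
      obtain ⟨remS, rkS⟩ := res
      cases hLB : altLoop V (altBuild E (altOut0 V, altPreds0 V)).2 (V.length - 2)
          (PySem.Set.add PySem.Set.empty s)
          (((altBuild E (altOut0 V, altPreds0 V)).2.getD s []).foldl
            (fun d u => d.modify u 0 (· - 1)) (altBuild E (altOut0 V, altPreds0 V)).1)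
          (PySem.Dict.empty.insert s (((V.length - 2 : Nat) : Int) + 1)) with
      | none => rw [hLB, hLS] at hbis; exact absurd hbis not_false
      | some resB =>
        obtain ⟨remB, rkB⟩ := resB
        rw [hLB, hLS] at hbis
        obtain ⟨hrem, hrkeq, hrks⟩ := hbis
        -- compute the two results
        have hBres : topOrd_alt V E = V.map (fun v =>
            (V.foldl (fun rk v => if PySem.Set.contains remB v then rk else rk.insert v 0)
              rkB).getD v 0) := by
          simp only [topOrd_alt]
          rw [hstep, hLB]
        have hSres : topOrd_alt (V.filter (fun v => decide ¬(v = s)))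
            (E.filter (fun e => decide ¬(e.1 = s) && decide ¬(e.2 = s)))
            = (P ++ Q).map (fun v =>
            ((P ++ Q).foldl (fun rk v => if PySem.Set.contains remS v then rk else rk.insert v 0)
              rkS).getD v 0) := by
          simp only [topOrd_alt]
          rw [hV', hlen2, hLS]
        -- pointwise agreement of the two rank readings
        have hpt : ∀ x ∈ V, x ≠ s →
            (V.foldl (fun rk v => if PySem.Set.contains remB v then rk else rk.insert v 0)
              rkB).getD x 0
            = ((P ++ Q).foldl (fun rk v => if PySem.Set.contains remS v then rk else rk.insert v 0)
              rkS).getD x 0 := by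
          intro x hxV hxs
          rw [fill_getD, fill_getD, hrkeq x hxs]
          have hcc : PySem.Set.contains remB x = PySem.Set.contains remS x := by
            rw [hrem x]; simp [hxs]
          rw [hcc]
          have hxPQ : x ∈ P ++ Q := (hmem' x).mpr ⟨hxV, hxs⟩
          by_cases hcs : PySem.Set.contains remS x = false <;> simp [hcs, hxV, hxPQ]
        have hptS : (V.foldl (fun rk v => if PySem.Set.contains remB v then rk else rk.insert v 0)
              rkB).getD s 0 = (V.length : Int) - 1 := by
          rw [fill_getD]
          have hct : PySem.Set.contains remB s = true := by rw [hrem s]; simp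
          have hnc : ¬(s ∈ V ∧ PySem.Set.contains remB s = false) := fun h => by
            rw [hct] at h; simp at h
          rw [if_neg hnc, hrks]
          omega
        -- assemble
        rw [topOrd_eq h1 hs hi, hIH, hSres, hBres]
        rw [List.map_append,
            List.take_left' (by rw [List.length_map]; exact hPlen),
            List.drop_left' (by rw [List.length_map]; exact hPlen)]
        rw [congrArg (List.map (fun v =>
          (V.foldl (fun rk v => if PySem.Set.contains remB v then rk else rk.insert v 0)
            rkB).getD v 0)) hV]
        rw [List.map_append, List.map_cons]
        refine congrArg₂ (· ++ ·)
          (List.map_congr_left fun x hx =>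
            (hpt x (by rw [hV]; exact List.mem_append_left _ hx) (hPne x hx)).symm)
          (congrArg₂ (· :: ·) hptS.symm
            (List.map_congr_left fun x hx =>
              (hpt x (by rw [hV]; exact List.mem_append_right _ (List.mem_cons_of_mem _ hx))
                (hQne x hx)).symm))

-- ===== VERDICT (by name: the statement is the Claim_ definition above) =====
theorem topOrd_spec : Claim_equal_topOrd := by
  intro V E _ hpre
  show topOrd V E = topOrd_alt V E
  exact topOrd_main V.length V E rfl hpre
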